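-- pv_equiv track=rewrite | github.com/myBraavos/braavos-account-cairo | e2e/utils/utils.py | u8s_to_u32s_padded
-- ===== SOURCE A (Python) =====
-- def u8s_to_u32s_padded(array_u8):
--     array_u32 = []
--     padding = 0
--     for i in range(0, len(array_u8), 4):
--         # Extract 4 bytes, or less if not available
--         as_u32_bytes = array_u8[i:i + 4]
--         # Pad with zeros if less than 4 bytes
--         while len(as_u32_bytes) < 4:
--             padding += 1
--             as_u32_bytes.append(0)
--         # Convert 4 bytes to a single u32 integer
--         u32 = as_u32_bytes[3] | (as_u32_bytes[2] << 8) | (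
--             as_u32_bytes[1] << 16) | (as_u32_bytes[0] << 24)
--         array_u32.append(u32)
--     return array_u32, padding
-- ===== SOURCE B (Python) =====
-- def u8s_to_u32s_padded(array_u8):
--     array_u32 = []
--     word = 0
--     k = 0  # bytes accumulated in the current word
--     for byte in array_u8:
--         word = byte if k == 0 else (word << 8) | byte
--         k += 1
--         if k == 4:
--             array_u32.append(word)
--             word = 0
--             k = 0
--     if k == 0:
--         return array_u32, 0
--     padding = 4 - k
--     array_u32.append(word << (8 * padding))
--     return array_u32, padding
-- ===== Notes on version B (the rewrite author's own statement) =====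
-- stated objective: alternative
-- what changed: Replaces A's outer loop over 4-byte slices with an inner zero-padding while-loop and 4-index OR assembly by a single byte-wise pass that keeps a shift/OR accumulator word and a fill counter, flushing a completed or zero-shifted final word.
import Mathlib
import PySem

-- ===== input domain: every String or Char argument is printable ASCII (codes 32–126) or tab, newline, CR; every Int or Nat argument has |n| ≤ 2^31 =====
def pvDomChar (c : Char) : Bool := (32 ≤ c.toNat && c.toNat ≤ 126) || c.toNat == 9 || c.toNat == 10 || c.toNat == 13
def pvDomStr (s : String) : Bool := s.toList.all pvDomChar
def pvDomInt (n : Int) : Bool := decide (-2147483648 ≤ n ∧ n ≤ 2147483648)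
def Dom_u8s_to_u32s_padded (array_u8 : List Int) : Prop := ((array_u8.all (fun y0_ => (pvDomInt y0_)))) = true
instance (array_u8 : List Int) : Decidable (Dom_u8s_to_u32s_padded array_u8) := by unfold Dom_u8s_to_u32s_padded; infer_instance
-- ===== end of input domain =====

-- B replaces A's per-chunk slicing/zero-padding with a single byte-wise pass keeping a shift/OR accumulator (alternative decomposition, same cost).



-- ===== PORT A =====
-- while len(as_u32_bytes) < 4: padding += 1; as_u32_bytes.append(0)
def padLoop (bs : List Int) (padding : Int) : List Int × Int :=
  if bs.length < 4 then padLoop (bs ++ [0]) (padding + 1) else (bs, padding)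
termination_by 4 - bs.length
decreasing_by simp; omega

-- u32 = as4[3] | (as4[2] << 8) | (as4[1] << 16) | (as4[0] << 24); after padLoop the
-- list always has length 4, so getD never takes its default and matches Python indexing exactly
def u32of (bs : List Int) : Int :=
  PySem.Int.bor (PySem.Int.bor (PySem.Int.bor (bs.getD 3 0) ((bs.getD 2 0) <<< (8:Nat)))
    ((bs.getD 1 0) <<< (16:Nat))) ((bs.getD 0 0) <<< (24:Nat))

-- the for-loop over range(0, len, 4) with slices array_u8[i:i+4], as chunk-wise recursion
def aGo : List Int → List Int → Int → List Int × Int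
  | [], arr, padding => (arr, padding)
  | x :: t, arr, padding =>
    let p := padLoop ((x :: t).take 4) padding
    aGo ((x :: t).drop 4) (arr ++ [u32of p.1]) p.2
termination_by rest _ _ => rest.length
decreasing_by simp

def u8s_to_u32s_padded (array_u8 : List Int) : List Int × Int :=
  aGo array_u8 [] 0

-- ===== PORT B =====
-- one iteration of B's for-loop over bytes; state = (array_u32, word, k)
def bStep (st : List Int × Int × Int) (byte : Int) : List Int × Int × Int :=
  let word := if st.2.2 == 0 then byte else PySem.Int.bor (st.2.1 <<< (8:Nat)) byte
  if st.2.2 + 1 == 4 then (st.1 ++ [word], 0, 0) else (st.1, word, st.2.2 + 1)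

def u8s_to_u32s_padded_alt (array_u8 : List Int) : List Int × Int :=
  let st := array_u8.foldl bStep ([], 0, 0)
  if st.2.2 == 0 then (st.1, 0)
  -- k is always 1, 2 or 3 here, so the shift amount 8*(4-k) is nonnegative and .toNat is exact
  else (st.1 ++ [st.2.1 <<< (8 * (4 - st.2.2)).toNat], 4 - st.2.2)

-- ===== PRECONDITION & SPEC =====
def Spec_u8s_to_u32s_padded (array_u8 : List Int) (out : List Int × Int) : Prop := out = u8s_to_u32s_padded_alt array_u8
instance (array_u8 : List Int) (out : List Int × Int) : Decidable (Spec_u8s_to_u32s_padded array_u8 out) := by unfold Spec_u8s_to_u32s_padded; infer_instance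

-- ===== CLAIM (what is proved, stated in full; the proofs are below) =====
def Claim_equal_u8s_to_u32s_padded : Prop := ∀ (array_u8 : List Int), Dom_u8s_to_u32s_padded array_u8 → Spec_u8s_to_u32s_padded array_u8 (u8s_to_u32s_padded array_u8)

-- ===== LEMMAS AND PROOFS =====
theorem nat_sub_and (X Y : Nat) : X - (X &&& Y) = X.ldiff Y := by
  induction X using Nat.binaryRec generalizing Y with
  | zero => simp [Nat.ldiff]
  | bit b n ih =>
    induction Y using Nat.bitCasesOn with
    | bit c m =>
      rw [Nat.land_bit, Nat.ldiff_bit, Nat.bit_val, Nat.bit_val, Nat.bit_val, ← ih m]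
      have := Nat.and_le_left (n := n) (m := m)
      cases b <;> cases c <;> simp <;> omega

theorem bor_eq_lor (a b : Int) : PySem.Int.bor a b = Int.lor a b := by
  unfold PySem.Int.bor
  cases a with
  | ofNat m =>
    cases b with
    | ofNat n => simp [Int.lor]
    | negSucc n =>
      rw [if_pos (show (0:Int) ≤ Int.ofNat m from Int.natCast_nonneg m), if_neg (not_le.mpr (Int.negSucc_lt_zero n))]
      have h1 : ((-Int.negSucc n - 1).toNat) = n := by simp [Int.negSucc_eq]
      rw [h1]
      show -((n - (n &&& m) : Nat) : Int) - 1 = Int.lor (Int.ofNat m) (Int.negSucc n)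
      rw [nat_sub_and]
      simp [Int.lor, Int.negSucc_eq]
      omega
  | negSucc m =>
    have h0 : ((-Int.negSucc m - 1).toNat) = m := by simp [Int.negSucc_eq]
    rw [if_neg (not_le.mpr (Int.negSucc_lt_zero m))]
    cases b with
    | ofNat n =>
      rw [if_pos (show (0:Int) ≤ Int.ofNat n from Int.natCast_nonneg n), h0]
      show -((m - (m &&& n) : Nat) : Int) - 1 = Int.lor (Int.negSucc m) (Int.ofNat n)
      rw [nat_sub_and]
      simp [Int.lor, Int.negSucc_eq]
      omega
    | negSucc n =>
      have h1 : ((-Int.negSucc n - 1).toNat) = n := by simp [Int.negSucc_eq]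
      rw [if_neg (not_le.mpr (Int.negSucc_lt_zero n)), h0, h1]
      simp [Int.lor, Int.negSucc_eq]
      omega

theorem int_ext {a b : Int} (h : ∀ k, a.testBit k = b.testBit k) : a = b := by
  cases a with
  | ofNat m =>
    cases b with
    | ofNat n =>
      congr 1
      apply Nat.eq_of_testBit_eq
      intro k
      have := h k
      simpa [Int.testBit] using this
    | negSucc n =>
      exfalso
      have hk := h (m + n)
      simp [Int.testBit] at hk
      have h1 : m.testBit (m + n) = false := Nat.testBit_eq_false_of_lt (by
        calc m < 2 ^ m := Nat.lt_two_pow_self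
        _ ≤ 2 ^ (m + n) := Nat.pow_le_pow_right (by omega) (by omega))
      have h2 : n.testBit (m + n) = false := Nat.testBit_eq_false_of_lt (by
        calc n < 2 ^ n := Nat.lt_two_pow_self
        _ ≤ 2 ^ (m + n) := Nat.pow_le_pow_right (by omega) (by omega))
      rw [h1, h2] at hk
      simp at hk
  | negSucc m =>
    cases b with
    | ofNat n =>
      exfalso
      have hk := h (m + n)
      simp [Int.testBit] at hk
      have h1 : m.testBit (m + n) = false := Nat.testBit_eq_false_of_lt (by
        calc m < 2 ^ m := Nat.lt_two_pow_self
        _ ≤ 2 ^ (m + n) := Nat.pow_le_pow_right (by omega) (by omega))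
      have h2 : n.testBit (m + n) = false := Nat.testBit_eq_false_of_lt (by
        calc n < 2 ^ n := Nat.lt_two_pow_self
        _ ≤ 2 ^ (m + n) := Nat.pow_le_pow_right (by omega) (by omega))
      rw [h1, h2] at hk
      simp at hk
    | negSucc n =>
      congr 1
      apply Nat.eq_of_testBit_eq
      intro k
      have := h k
      simpa [Int.testBit] using this

theorem tb_bor (a b : Int) (k : Nat) :
    (PySem.Int.bor a b).testBit k = (a.testBit k || b.testBit k) := by
  rw [bor_eq_lor]
  exact Int.testBit_lor a b k

theorem tb_double_zero (a : Int) : (a * 2).testBit 0 = false := by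
  cases a with
  | ofNat m =>
    show (Int.ofNat m * 2).testBit 0 = false
    rw [show Int.ofNat m * 2 = Int.ofNat (2 * m) by simp [Int.ofNat_eq_natCast]; ring]
    simp [Int.testBit, Nat.testBit_zero]
  | negSucc m =>
    rw [show Int.negSucc m * 2 = Int.negSucc (2 * m + 1) by simp [Int.negSucc_eq]; ring]
    simp [Int.testBit, Nat.testBit_zero]

theorem tb_double_succ (a : Int) (k : Nat) : (a * 2).testBit (k + 1) = a.testBit k := by
  cases a with
  | ofNat m =>
    rw [show Int.ofNat m * 2 = Int.ofNat (2 * m) by simp [Int.ofNat_eq_natCast]; ring]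
    simp [Int.testBit, Nat.testBit_succ]
  | negSucc m =>
    rw [show Int.negSucc m * 2 = Int.negSucc (2 * m + 1) by simp [Int.negSucc_eq]; ring]
    simp [Int.testBit, Nat.testBit_succ]
    congr 1
    omega

theorem tb_shl (a : Int) (n k : Nat) :
    (a <<< n).testBit k = if k < n then false else a.testBit (k - n) := by
  induction n generalizing k with
  | zero => simp [Int.shiftLeft_eq]
  | succ n ih =>
    have hs : a <<< (n + 1) = (a <<< n) * 2 := by
      rw [Int.shiftLeft_eq, Int.shiftLeft_eq, pow_succ]; ring
    rw [hs]
    cases k with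
    | zero => simp [tb_double_zero]
    | succ k =>
      rw [tb_double_succ, ih]
      by_cases h : k < n <;> simp [h]

theorem word_eq4 (a b c d : Int) :
    PySem.Int.bor (PySem.Int.bor (PySem.Int.bor d (c <<< (8:Nat))) (b <<< (16:Nat))) (a <<< (24:Nat)) =
    PySem.Int.bor ((PySem.Int.bor ((PySem.Int.bor (a <<< (8:Nat)) b) <<< (8:Nat)) c) <<< (8:Nat)) d := by
  apply int_ext
  intro k
  simp only [tb_bor, tb_shl, Nat.sub_sub]
  split_ifs <;> first | omega | simp_all [Bool.or_comm, Bool.or_assoc]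

theorem bor_zero_left (a : Int) : PySem.Int.bor 0 a = a := by
  rw [PySem.Int.bor_comm]
  exact PySem.Int.bor_zero a

theorem word_eq2 (a b : Int) :
    PySem.Int.bor (b <<< (16:Nat)) (a <<< (24:Nat)) =
    (PySem.Int.bor (a <<< (8:Nat)) b) <<< (16:Nat) := by
  apply int_ext
  intro k
  simp only [tb_bor, tb_shl, Nat.sub_sub]
  split_ifs <;> first | omega | simp_all [Bool.or_comm]

theorem word_eq3 (a b c : Int) :
    PySem.Int.bor (PySem.Int.bor (c <<< (8:Nat)) (b <<< (16:Nat))) (a <<< (24:Nat)) =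
    (PySem.Int.bor ((PySem.Int.bor (a <<< (8:Nat)) b) <<< (8:Nat)) c) <<< (8:Nat) := by
  apply int_ext
  intro k
  simp only [tb_bor, tb_shl, Nat.sub_sub]
  split_ifs <;> first | omega | simp_all [Bool.or_comm, Bool.or_assoc]

theorem padLoop1 (a : Int) (p : Int) : padLoop [a] p = ([a,0,0,0], p+3) := by
  rw [padLoop]; norm_num; rw [padLoop]; norm_num; rw [padLoop]; norm_num; rw [padLoop]; norm_num; omega

theorem padLoop2 (a b : Int) (p : Int) : padLoop [a,b] p = ([a,b,0,0], p+2) := by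
  rw [padLoop]; norm_num; rw [padLoop]; norm_num; rw [padLoop]; norm_num; omega

theorem padLoop3 (a b c : Int) (p : Int) : padLoop [a,b,c] p = ([a,b,c,0], p+1) := by
  rw [padLoop]; norm_num; rw [padLoop]; norm_num

theorem padLoop4 (a b c d : Int) (p : Int) : padLoop [a,b,c,d] p = ([a,b,c,d], p) := by
  rw [padLoop]; norm_num

theorem aGo_eq : ∀ (bs arr : List Int) (pad : Int),
    aGo bs arr pad =
      (let st := bs.foldl bStep (arr, 0, 0)
       if st.2.2 == 0 then (st.1, pad)
       else (st.1 ++ [st.2.1 <<< (8 * (4 - st.2.2)).toNat], pad + (4 - st.2.2)))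
  | [], arr, pad => by rw [aGo]; simp
  | [a], arr, pad => by
      rw [aGo]
      simp [padLoop1, u32of]
      rw [aGo]
      simp [bStep, bor_zero_left]
  | [a, b], arr, pad => by
      rw [aGo]
      simp [padLoop2, u32of]
      rw [aGo]
      simp [bStep, bor_zero_left, word_eq2]
  | [a, b, c], arr, pad => by
      rw [aGo]
      simp [padLoop3, u32of]
      rw [aGo]
      simp [bStep, bor_zero_left, word_eq3]
  | a :: b :: c :: d :: rest, arr, pad => by
      have ih := aGo_eq rest (arr ++ [u32of [a, b, c, d]]) pad
      rw [aGo]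
      simp only [List.take, List.drop, padLoop4]
      rw [ih]
      simp [List.foldl, bStep, u32of, word_eq4]
termination_by bs _ _ => bs.length

-- ===== VERDICT (by name: the statement is the Claim_ definition above) =====
theorem u8s_to_u32s_padded_spec : Claim_equal_u8s_to_u32s_padded := by
  intro array_u8 _
  unfold Spec_u8s_to_u32s_padded u8s_to_u32s_padded u8s_to_u32s_padded_alt
  rw [aGo_eq]
  simp
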